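-- pv_equiv track=rewrite | github.com/thumbe12856/competitive-programming | cf/_contest/Div3_710/7/solve.py | solve
-- ===== SOURCE A (Python) =====
-- def solve(S):
--     q = []
--     vis = {}
--     for i in range(len(S)):
--         if S[i] not in vis:
--             vis[S[i]] = len(q)
--             q.append(S[i])
--         else:
--             idx = vis[S[i]]
--             ori_idx = idx
--
--             while idx + 1 < len(q) and q[idx + 1] == "":
--                 idx += 1
--
--             if idx + 1 < len(q) and q[idx + 1] >= S[i]:
--                 q[ori_idx] = ""
--                 vis[S[i]] = len(q)
--                 q.append(S[i])
--
--     return ("").join(q)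
-- ===== SOURCE B (Python) =====
-- def solve(S):
--     # Timestamp formulation: instead of A's growing slot array with blank
--     # tombstones, keep only a map char -> timestamp of its live copy.  A
--     # character's "next live slot" is the live char with the smallest larger
--     # timestamp; the answer is the distinct chars sorted by timestamp.
--     t = {}
--     clock = 0
--     for c in S:
--         if c not in t:
--             t[c] = clock
--             clock += 1
--         else:
--             succ = None
--             for d, td in t.items():
--                 if td > t[c] and (succ is None or td < t[succ]):
--                     succ = d
--             if succ is not None and succ >= c:
--                 t[c] = clock
--                 clock += 1
--     return "".join(sorted(t, key=t.get))
-- ===== Notes on version B (the rewrite author's own statement) =====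
-- stated objective: alternative
-- what changed: B discards A's growing slot array with blank tombstones and its blank-skipping scan: it keeps only a map from char to the timestamp of its live copy, finds a character's successor as the live char with the smallest larger timestamp, and produces the answer at the end by sorting the distinct chars by timestamp (A builds the output left-to-right in the array).
import Mathlib
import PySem

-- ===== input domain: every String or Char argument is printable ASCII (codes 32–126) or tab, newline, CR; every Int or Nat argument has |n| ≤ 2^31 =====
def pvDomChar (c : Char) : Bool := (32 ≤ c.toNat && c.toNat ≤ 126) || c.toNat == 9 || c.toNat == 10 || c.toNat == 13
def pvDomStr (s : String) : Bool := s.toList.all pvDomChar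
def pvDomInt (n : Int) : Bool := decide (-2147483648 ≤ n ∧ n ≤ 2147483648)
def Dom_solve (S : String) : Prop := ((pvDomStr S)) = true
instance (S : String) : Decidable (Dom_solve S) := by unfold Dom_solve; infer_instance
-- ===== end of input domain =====

-- B replaces A's slot array with blank tombstones (and its blank-skipping scan) by a
-- timestamp map char -> time of the live copy; the successor is the live char with the
-- smallest larger timestamp and the output is the chars sorted by timestamp. Alternative
-- algorithm of similar cost, not claimed faster.

-- ===== PORT A =====
-- q's entries are one-character strings or "", ported as Option Char (none = "");
-- `x >= S[i]` on such entries is exactly `some d ↦ c ≤ d, none ↦ false` ("" < any 1-char string).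
def pvGeA (o : Option Char) (c : Char) : Bool :=
  match o with
  | some d => c ≤ d
  | none => false

-- the while loop `while idx+1 < len(q) and q[idx+1] == "": idx += 1`,
-- fuel = q.length bounds its iteration count for the indices A reaches (idx ≥ 0)
def pvSkipA (fuel : Nat) (q : List (Option Char)) (idx : Int) : Int :=
  match fuel with
  | 0 => idx
  | fuel + 1 =>
      if idx + 1 < (q.length : Int) ∧ PySem.List.pyGet? q (idx + 1) = some none then
        pvSkipA fuel q (idx + 1)
      else idx

-- one iteration of A's `for i in range(len(S))` body (state: q, vis)
def pvStepA (st : List (Option Char) × PySem.Dict Char Int) (c : Char) :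
    List (Option Char) × PySem.Dict Char Int :=
  let q := st.1
  let vis := st.2
  if vis.contains c = false then
    (q ++ [some c], vis.insert c (q.length : Int))
  else
    let oriIdx := vis.getD c 0
    let idx := pvSkipA q.length q oriIdx
    if idx + 1 < (q.length : Int) ∧ pvGeA (PySem.List.pyGetD q (idx + 1) none) c then
      ((PySem.List.pySetD q oriIdx none) ++ [some c], vis.insert c (q.length : Int))
    else (q, vis)

def solve (S : String) : String :=
  -- "".join(q) over ""/1-char entries = the chars of the `some` entries in order
  String.ofList ((S.toList.foldl pvStepA ([], PySem.Dict.empty)).1.filterMap id)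

-- ===== PORT B =====
-- the body of B's inner `for d, td in t.items()` loop (succ accumulator)
def pvSuccStep (t : PySem.Dict Char Int) (tc : Int) (succ : Option Char) (p : Char × Int) :
    Option Char :=
  match succ with
  | none => if tc < p.2 then some p.1 else none
  | some s => if tc < p.2 ∧ p.2 < t.getD s 0 then some p.1 else some s

-- succ = live char with the smallest timestamp above tc (B's inner scan)
def pvSuccB (t : PySem.Dict Char Int) (tc : Int) : Option Char :=
  t.items.foldl (pvSuccStep t tc) none

-- one iteration of B's `for c in S` body (state: t, clock)
def pvStepB (st : PySem.Dict Char Int × Int) (c : Char) : PySem.Dict Char Int × Int :=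
  let t := st.1
  let clock := st.2
  if t.contains c = false then (t.insert c clock, clock + 1)
  else
    match pvSuccB t (t.getD c 0) with
    | some s => if c ≤ s then (t.insert c clock, clock + 1) else (t, clock)
    | none => (t, clock)

def solve_alt (S : String) : String :=
  let st := S.toList.foldl pvStepB (PySem.Dict.empty, 0)
  String.ofList (PySem.List.sorted st.1.keys (fun d => st.1.getD d 0) false)

-- ===== PRECONDITION & SPEC =====
def Spec_solve (S : String) (out : String) : Prop := out = solve_alt S
instance (S : String) (out : String) : Decidable (Spec_solve S out) := by unfold Spec_solve; infer_instance

-- ===== CLAIM (what is proved, stated in full; the proofs are below) =====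
def Claim_equal_solve : Prop := ∀ (S : String), Dom_solve S → Spec_solve S (solve S)

-- ===== LEMMAS AND PROOFS =====

-- coupling invariant on A's state: vis maps exactly the live chars to their slot index
def pvInv (q : List (Option Char)) (vis : PySem.Dict Char Int) : Prop :=
  (∀ c : Char, vis.contains c = true →
      ∃ i : Nat, vis.getD c 0 = (i : Int) ∧ ∃ h : i < q.length, q[i] = some c) ∧
  (∀ (i : Nat) (h : i < q.length) (c : Char), q[i] = some c →
      vis.contains c = true ∧ vis.getD c 0 = (i : Int)) ∧
  vis.keys.Nodup

theorem pvInv_init : pvInv [] PySem.Dict.empty := by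
  refine ⟨?_, ?_, ?_⟩
  · intro c hc; simp [PySem.Dict.contains_empty] at hc
  · intro i h; simp at h
  · simp [PySem.Dict.keys, PySem.Dict.empty]

theorem pvSkipA_spec (fuel : Nat) (q : List (Option Char)) (i : Nat)
    (hf : q.length ≤ i + 1 + fuel) :
    pvSkipA fuel q (i : Int) =
      ((i : Int) + ((q.drop (i + 1)).takeWhile (fun o => o == none)).length) := by
  induction fuel generalizing i with
  | zero =>
      have : q.drop (i + 1) = [] := List.drop_eq_nil_of_le (by omega)
      simp [pvSkipA, this]
  | succ fuel ih =>
      by_cases hlt : i + 1 < q.length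
      · have hget : PySem.List.pyGet? q ((i : Int) + 1) = q[i + 1]? := by
          have := PySem.List.pyGet?_natCast (xs := q) (n := i + 1)
          simpa using this
        have hdrop : q.drop (i + 1) = q[i + 1]'hlt :: q.drop (i + 2) := by
          rw [List.drop_eq_getElem_cons hlt]
        by_cases hnone : q[i + 1]'hlt = none
        · have hcond : (i : Int) + 1 < (q.length : Int) ∧
              PySem.List.pyGet? q ((i : Int) + 1) = some none := by
            constructor
            · exact_mod_cast hlt
            · rw [hget, List.getElem?_eq_getElem hlt, hnone]
          have := ih (i + 1) (by omega)
          simp only [pvSkipA, if_pos hcond]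
          have hcast : (i : Int) + 1 = ((i + 1 : Nat) : Int) := by push_cast; ring
          rw [hcast, this, hdrop]
          simp [hnone]
          ring
        · have hcond : ¬ ((i : Int) + 1 < (q.length : Int) ∧
              PySem.List.pyGet? q ((i : Int) + 1) = some none) := by
            rintro ⟨-, h2⟩
            rw [hget, List.getElem?_eq_getElem hlt] at h2
            exact hnone (Option.some.injEq _ _ ▸ h2)
          simp only [pvSkipA, if_neg hcond]
          rw [hdrop]
          simp [hnone]
      · have hdrop : q.drop (i + 1) = [] := List.drop_eq_nil_of_le (by omega)
        have hcond : ¬ ((i : Int) + 1 < (q.length : Int) ∧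
            PySem.List.pyGet? q ((i : Int) + 1) = some none) := by
          rintro ⟨h1, -⟩; omega
        simp [pvSkipA, if_neg hcond, hdrop]

-- B's inner scan written over keys alone
def pvSel (val : Char → Int) (tc : Int) (succ : Option Char) (d : Char) : Option Char :=
  match succ with
  | none => if tc < val d then some d else none
  | some s => if tc < val d ∧ val d < val s then some d else some s

-- min characterisation of the inner scan
theorem pvSel_spec (val : Char → Int) (tc : Int) :
    ∀ (l : List Char) (acc : Option Char),
      (∀ s0, acc = some s0 → tc < val s0) →
      ((l.foldl (pvSel val tc) acc = none → acc = none ∧ ∀ d ∈ l, ¬ tc < val d) ∧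
       (∀ s, l.foldl (pvSel val tc) acc = some s →
          (s ∈ l ∨ acc = some s) ∧ tc < val s ∧
          (∀ d ∈ l, tc < val d → val s ≤ val d) ∧
          (∀ s0, acc = some s0 → val s ≤ val s0))) := by
  intro l
  induction l with
  | nil =>
      intro acc hacc
      constructor
      · intro h; exact ⟨h, by simp⟩
      · intro s hs
        simp only [List.foldl_nil] at hs
        exact ⟨Or.inr hs, hacc s hs, by simp, fun s0 h0 => by rw [hs] at h0; cases h0; rfl⟩
  | cons d l ih =>
      intro acc hacc
      have hacc' : ∀ s0, pvSel val tc acc d = some s0 → tc < val s0 := by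
        intro s0 h0
        cases acc with
        | none =>
            simp only [pvSel] at h0
            split_ifs at h0 with h1
            · cases h0; exact h1
        | some a =>
            simp only [pvSel] at h0
            split_ifs at h0 with h1
            · cases h0; exact h1.1
            · injection h0 with h; subst h; exact hacc _ rfl
      obtain ⟨ihn, ihs⟩ := ih (pvSel val tc acc d) hacc'
      constructor
      · intro h
        simp only [List.foldl_cons] at h
        obtain ⟨h1, h2⟩ := ihn h
        cases acc with
        | none =>
            simp only [pvSel] at h1
            split_ifs at h1 with hd
            refine ⟨rfl, ?_⟩
            intro e he
            rcases List.mem_cons.mp he with rfl | he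
            · exact hd
            · exact h2 e he
        | some s => simp only [pvSel] at h1; split_ifs at h1
      · intro s hs
        simp only [List.foldl_cons] at hs
        obtain ⟨hmem, hts, hmin, haccb⟩ := ihs s hs
        -- facts about the first step
        refine ⟨?_, hts, ?_, ?_⟩
        · rcases hmem with hm | hm
          · exact Or.inl (List.mem_cons_of_mem _ hm)
          · cases acc with
            | none =>
                simp only [pvSel] at hm
                split_ifs at hm with h1
                · cases hm; exact Or.inl (List.mem_cons_self)
            | some a =>
                simp only [pvSel] at hm
                split_ifs at hm with h1
                · cases hm; exact Or.inl (List.mem_cons_self)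
                · cases hm; exact Or.inr rfl
        · intro e he hte
          rcases List.mem_cons.mp he with rfl | he
          · -- e = d : bound val s by the first step's accumulator
            cases acc with
            | none =>
                have : pvSel val tc none e = some e := by simp [pvSel, hte]
                have := haccb e this
                exact this
            | some a =>
                by_cases h1 : tc < val e ∧ val e < val a
                · have : pvSel val tc (some a) e = some e := by simp [pvSel, h1]
                  exact haccb e this
                · have : pvSel val tc (some a) e = some a := by simp [pvSel, h1]
                  have hsa := haccb a this
                  have : ¬ val e < val a := fun hlt => h1 ⟨hte, hlt⟩
                  omega
          · exact hmin e he hte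
        · intro s0 h0
          subst h0
          by_cases h1 : tc < val d ∧ val d < val s0
          · have := haccb d (by simp [pvSel, h1])
            omega
          · exact haccb s0 (by simp [pvSel, h1])

-- the items-scan equals the keys-scan under key/value consistency
theorem pvSuccB_eq_sel (t : PySem.Dict Char Int) (tc : Int) (hnd : t.keys.Nodup) :
    pvSuccB t tc = t.keys.foldl (pvSel (fun d => t.getD d 0) tc) none := by
  unfold pvSuccB
  rw [PySem.List.foldl_congr_mem t.items (pvSuccStep t tc)
      (fun acc p => pvSel (fun d => t.getD d 0) tc acc p.1) none ?_]
  · show t.items.foldl (fun acc p => pvSel (fun d => t.getD d 0) tc acc p.1) none = _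
    have : t.keys = t.items.map Prod.fst := rfl
    rw [this, List.foldl_map]
  · intro acc p hp
    have hv : t.getD p.1 0 = p.2 := PySem.Dict.getD_of_mem_items t (by exact hp) hnd 0
    cases acc with
    | none => simp [pvSuccStep, pvSel, hv]
    | some s => simp [pvSuccStep, pvSel, hv]

theorem pvTakeWhile_boundary {α : Type} (p : α → Bool) :
    ∀ (l : List α) (h : (l.takeWhile p).length < l.length),
      p (l[(l.takeWhile p).length]) = false := by
  intro l
  induction l with
  | nil => intro h; simp at h
  | cons x t ih =>
      intro h
      by_cases hx : p x = true
      · simp only [List.takeWhile_cons, if_pos hx] at h ⊢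
        simpa using ih (by simpa using h)
      · simp only [List.takeWhile_cons, if_neg hx] at h ⊢
        simpa using hx

theorem pvBlank {α : Type} (p : α → Bool) (l : List α) (m : Nat)
    (hm : m < (l.takeWhile p).length) :
    p (l[m]'(hm.trans_le (l.takeWhile_prefix p).length_le)) = true := by
  have h1 : (l.takeWhile p)[m]'hm = l[m]'(hm.trans_le (l.takeWhile_prefix p).length_le) :=
    (l.takeWhile_prefix p).getElem hm
  exact h1 ▸ List.mem_takeWhile_imp (List.getElem_mem _)

theorem pvInv_new (q : List (Option Char)) (vis : PySem.Dict Char Int) (c : Char)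
    (hcf : vis.contains c = false) (h : pvInv q vis) :
    pvInv (q ++ [some c]) (vis.insert c (q.length : Int)) := by
  obtain ⟨h1, h2, h3⟩ := h
  refine ⟨?_, ?_, PySem.Dict.nodup_keys_insert vis c _ h3⟩
  · intro x hx
    by_cases hxc : x = c
    · subst hxc
      refine ⟨q.length, PySem.Dict.getD_insert_self vis x _ 0, by simp, ?_⟩
      exact List.getElem_concat_length rfl _
    · rw [PySem.Dict.contains_insert] at hx
      have hx' : vis.contains x = true := by
        rcases Bool.or_eq_true_iff.mp hx with h | h
        · exact absurd (by simpa using h) hxc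
        · exact h
      obtain ⟨i, hg, hi, hq⟩ := h1 x hx'
      refine ⟨i, by rw [PySem.Dict.getD_insert_of_ne vis _ _ hxc, hg], by simp; omega, ?_⟩
      rw [List.getElem_append_left hi]; exact hq
  · intro i hi x hx
    by_cases hiq : i < q.length
    · have hqx : q[i] = some x := by rw [← hx]; exact (List.getElem_append_left hiq).symm
      obtain ⟨hcx, hgx⟩ := h2 i hiq x hqx
      have hxc : x ≠ c := fun he => by rw [he] at hcx; rw [hcx] at hcf; cases hcf
      constructor
      · rw [PySem.Dict.contains_insert]; simp [hcx]
      · rw [PySem.Dict.getD_insert_of_ne vis _ _ hxc, hgx]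
    · have hie : i = q.length := by simp at hi; omega
      have hxx : (q ++ [some c])[i]'hi = some c := List.getElem_concat_length hie _
      rw [hxx] at hx
      cases hx
      refine ⟨by rw [PySem.Dict.contains_insert]; simp, ?_⟩
      rw [hie]
      exact PySem.Dict.getD_insert_self vis c _ 0

theorem pvInv_move (q : List (Option Char)) (vis : PySem.Dict Char Int) (c : Char)
    (i0 : Nat) (hi0 : i0 < q.length) (hq0 : q[i0] = some c) (h : pvInv q vis) :
    pvInv (q.set i0 none ++ [some c]) (vis.insert c (q.length : Int)) := by
  obtain ⟨h1, h2, h3⟩ := h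
  have hlen : (q.set i0 none).length = q.length := by simp
  refine ⟨?_, ?_, PySem.Dict.nodup_keys_insert vis c _ h3⟩
  · intro x hx
    by_cases hxc : x = c
    · subst hxc
      refine ⟨q.length, PySem.Dict.getD_insert_self vis x _ 0, by simp, ?_⟩
      exact List.getElem_concat_length hlen.symm _
    · rw [PySem.Dict.contains_insert] at hx
      have hx' : vis.contains x = true := by
        rcases Bool.or_eq_true_iff.mp hx with h | h
        · exact absurd (by simpa using h) hxc
        · exact h
      obtain ⟨i, hg, hi, hq⟩ := h1 x hx'
      have hne : i0 ≠ i := fun he => by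
        subst he; rw [hq0] at hq; exact hxc (Option.some.inj hq).symm
      refine ⟨i, by rw [PySem.Dict.getD_insert_of_ne vis _ _ hxc, hg], by simp; omega, ?_⟩
      have hi' : i < (q.set i0 none).length := by simpa using hi
      rw [List.getElem_append_left hi', List.getElem_set_ne hne]
      exact hq
  · intro i hi x hx
    by_cases hiq : i < (q.set i0 none).length
    · have hqx : (q.set i0 none)[i] = some x := by
        rw [← hx]; exact (List.getElem_append_left hiq).symm
      have hii0 : i0 ≠ i := fun he => by
        subst he
        rw [List.getElem_set_self (by simpa using hi0)] at hqx
        cases hqx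
      rw [List.getElem_set_ne hii0] at hqx
      have hiq' : i < q.length := by simpa using hiq
      obtain ⟨hcx, hgx⟩ := h2 i hiq' x hqx
      have hxc : x ≠ c := fun he => by
        subst he
        have := (h2 i0 hi0 x hq0).2
        rw [hgx] at this
        have : i = i0 := by exact_mod_cast this
        exact hii0 this.symm
      constructor
      · rw [PySem.Dict.contains_insert]; simp [hcx]
      · rw [PySem.Dict.getD_insert_of_ne vis _ _ hxc, hgx]
    · have hie : i = q.length := by simp at hi hiq; omega
      have hie' : i = (q.set i0 none).length := by rw [hlen]; exact hie
      have hxx : (q.set i0 none ++ [some c])[i]'hi = some c :=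
        List.getElem_concat_length hie' _
      rw [hxx] at hx
      cases hx
      refine ⟨by rw [PySem.Dict.contains_insert]; simp, ?_⟩
      rw [hie]
      exact PySem.Dict.getD_insert_self vis c _ 0

theorem pvStep_corr (q : List (Option Char)) (vis : PySem.Dict Char Int) (c : Char)
    (h : pvInv q vis) :
    pvStepB (vis, (q.length : Int)) c =
      ((pvStepA (q, vis) c).2, (((pvStepA (q, vis) c).1.length : Int))) ∧
    pvInv (pvStepA (q, vis) c).1 (pvStepA (q, vis) c).2 := by
  obtain ⟨h1, h2, h3⟩ := h
  by_cases hcont : vis.contains c = true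
  case neg =>
    have hcf : vis.contains c = false := by simpa using hcont
    have hA : pvStepA (q, vis) c = (q ++ [some c], vis.insert c (q.length : Int)) := by
      simp [pvStepA, hcf]
    have hB : pvStepB (vis, (q.length : Int)) c =
        (vis.insert c (q.length : Int), (q.length : Int) + 1) := by
      simp [pvStepB, hcf]
    refine ⟨by rw [hA, hB]; simp, ?_⟩
    rw [hA]
    exact pvInv_new q vis c hcf ⟨h1, h2, h3⟩
  case pos =>
    obtain ⟨i0, hgd, hi0, hq0⟩ := h1 c hcont
    set k := ((q.drop (i0 + 1)).takeWhile (fun o => o == none)).length with hk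
    have hkle : k ≤ q.length - (i0 + 1) := by
      have hsub := ((q.drop (i0 + 1)).takeWhile_sublist (fun o => o == none)).length_le
      rw [List.length_drop] at hsub
      exact hsub
    have hskip : pvSkipA q.length q (vis.getD c 0) = (i0 : Int) + k := by
      rw [hgd, pvSkipA_spec q.length q i0 (by omega)]
    have hblank : ∀ m, m < k → q[i0 + 1 + m]? = some none := by
      intro m hm
      have hmlt : i0 + 1 + m < q.length := by omega
      have hb := pvBlank (fun o => o == none) (q.drop (i0 + 1)) m (hk ▸ hm)
      have hg : (q.drop (i0 + 1))[m]'((hk ▸ hm).trans_le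
          ((q.drop (i0 + 1)).takeWhile_prefix (fun o => o == none)).length_le) =
          q[i0 + 1 + m]'hmlt := by
        rw [List.getElem_drop]
      rw [hg] at hb
      rw [List.getElem?_eq_getElem hmlt]
      simpa using hb
    -- slot of any live char s with i0 < slot is at least i0 + 1 + k
    have hslotge : ∀ (s : Char) (js : Nat) (hjs : js < q.length), q[js] = some s →
        i0 < js → i0 + 1 + k ≤ js := by
      intro s js hjs hqs hgt
      by_contra hlt
      have hm : js - (i0 + 1) < k := by omega
      have hn := hblank (js - (i0 + 1)) hm
      rw [show i0 + 1 + (js - (i0 + 1)) = js by omega] at hn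
      rw [List.getElem?_eq_getElem hjs, hqs] at hn
      cases hn
    by_cases hend : i0 + 1 + k < q.length
    case neg =>
      -- no live slot after i0: both do nothing
      have hlen : i0 + 1 + k = q.length ∨ q.length ≤ i0 + 1 + k := by omega
      have hcondA : ¬ (pvSkipA q.length q (vis.getD c 0) + 1 < (q.length : Int) ∧
          pvGeA (PySem.List.pyGetD q (pvSkipA q.length q (vis.getD c 0) + 1) none) c = true) := by
        rintro ⟨hlt, -⟩
        rw [hskip] at hlt
        omega
      have hA : pvStepA (q, vis) c = (q, vis) := by
        simp only [pvStepA, hcont]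
        simp only [Bool.true_eq_false, if_false]
        rw [if_neg hcondA]
      have hsnone : pvSuccB vis (vis.getD c 0) = none := by
        rw [pvSuccB_eq_sel vis _ h3]
        cases hr : vis.keys.foldl (pvSel (fun d => vis.getD d 0) (vis.getD c 0)) none with
        | none => rfl
        | some s =>
            exfalso
            obtain ⟨hmem, hts, -, -⟩ :=
              ((pvSel_spec (fun d => vis.getD d 0) (vis.getD c 0)) vis.keys none
                (by intro s0 h0; cases h0)).2 s hr
            have hsk : s ∈ vis.keys := by
              rcases hmem with h | h
              · exact h
              · cases h
            obtain ⟨js, hgs, hjs, hqs⟩ := h1 s ((PySem.Dict.contains_iff_mem_keys vis s).mpr hsk)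
            rw [hgd, hgs] at hts
            have hgt : i0 < js := by exact_mod_cast hts
            have := hslotge s js hjs hqs hgt
            omega
      have hB : pvStepB (vis, (q.length : Int)) c = (vis, (q.length : Int)) := by
        simp only [pvStepB, hcont]
        simp only [Bool.true_eq_false, if_false]
        rw [hsnone]
      exact ⟨by rw [hA, hB], by rw [hA]; exact ⟨h1, h2, h3⟩⟩
    case pos =>
      -- first live slot after i0 is j := i0 + 1 + k, holding some d
      set j := i0 + 1 + k with hj
      have hbound : ¬ ((q.drop (i0 + 1)).takeWhile (fun o => o == none)).length <
          (q.drop (i0 + 1)).length → False := by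
        intro hnb
        apply hnb
        rw [← hk]
        simp
        omega
      have hklt : k < (q.drop (i0 + 1)).length := by simp; omega
      have hnotnone : ¬ q[j]'hend = none := by
        have hb := pvTakeWhile_boundary (fun o => o == none) (q.drop (i0 + 1)) (hk ▸ hklt)
        have hg : (q.drop (i0 + 1))[((q.drop (i0 + 1)).takeWhile (fun o => o == none)).length]'(hk ▸ hklt) =
            q[j]'hend := by
          rw [List.getElem_drop]
        rw [hg] at hb
        intro he
        rw [he] at hb
        simp at hb
      obtain ⟨d, hqj⟩ : ∃ d, q[j]'hend = some d := by
        cases hqj : q[j]'hend with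
        | none => exact absurd hqj hnotnone
        | some d => exact ⟨d, rfl⟩
      obtain ⟨hcd, hgdd⟩ := h2 j hend d hqj
      -- A's lookup at idx+1 yields some d
      have hgetA : PySem.List.pyGetD q (pvSkipA q.length q (vis.getD c 0) + 1) none = some d := by
        rw [hskip]
        have hcast : (i0 : Int) + (k : Int) + 1 = ((j : Nat) : Int) := by omega
        rw [hcast, PySem.List.pyGetD_natCast, List.getD_eq_getElem?_getD,
          List.getElem?_eq_getElem hend, hqj]
        rfl
      -- B's successor is d
      have hsucc : pvSuccB vis (vis.getD c 0) = some d := by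
        rw [pvSuccB_eq_sel vis _ h3]
        cases hr : vis.keys.foldl (pvSel (fun d => vis.getD d 0) (vis.getD c 0)) none with
        | none =>
            exfalso
            obtain ⟨-, hall⟩ :=
              ((pvSel_spec (fun d => vis.getD d 0) (vis.getD c 0)) vis.keys none
                (by intro s0 h0; cases h0)).1 hr
            have hdm : d ∈ vis.keys := (PySem.Dict.contains_iff_mem_keys vis d).mp hcd
            have := hall d hdm
            rw [hgd, hgdd] at this
            apply this
            exact_mod_cast (by omega : (i0 : Int) < (j : Int))
        | some s =>
            obtain ⟨hmem, hts, hmin, -⟩ :=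
              ((pvSel_spec (fun d => vis.getD d 0) (vis.getD c 0)) vis.keys none
                (by intro s0 h0; cases h0)).2 s hr
            have hsk : s ∈ vis.keys := by
              rcases hmem with h | h
              · exact h
              · cases h
            obtain ⟨js, hgs, hjs, hqs⟩ := h1 s ((PySem.Dict.contains_iff_mem_keys vis s).mpr hsk)
            rw [hgd, hgs] at hts
            have hgt : i0 < js := by exact_mod_cast hts
            have hge1 : j ≤ js := hslotge s js hjs hqs hgt
            have hdm : d ∈ vis.keys := (PySem.Dict.contains_iff_mem_keys vis d).mp hcd
            have hle := hmin d hdm (by rw [hgd, hgdd]; exact_mod_cast (by omega : (i0 : Int) < (j : Int)))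
            rw [hgs, hgdd] at hle
            have hle' : js ≤ j := by exact_mod_cast hle
            have hjs' : js = j := by omega
            subst hjs'
            rw [hqs] at hqj
            cases hqj
            rfl
      by_cases hge : c ≤ d
      case pos =>
        have hcondA : pvSkipA q.length q (vis.getD c 0) + 1 < (q.length : Int) ∧
            pvGeA (PySem.List.pyGetD q (pvSkipA q.length q (vis.getD c 0) + 1) none) c = true := by
          constructor
          · rw [hskip]; omega
          · rw [hgetA]; simpa [pvGeA] using hge
        have hA : pvStepA (q, vis) c =
            ((PySem.List.pySetD q (vis.getD c 0) none) ++ [some c],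
              vis.insert c (q.length : Int)) := by
          simp only [pvStepA, hcont]
          simp only [Bool.true_eq_false, if_false]
          rw [if_pos hcondA]
        have hsetq : PySem.List.pySetD q (vis.getD c 0) none = q.set i0 none := by
          rw [hgd, PySem.List.pySetD_natCast]
        have hB : pvStepB (vis, (q.length : Int)) c =
            (vis.insert c (q.length : Int), (q.length : Int) + 1) := by
          simp only [pvStepB, hcont]
          simp only [Bool.true_eq_false, if_false]
          rw [hsucc]
          simp [hge]
        refine ⟨?_, ?_⟩
        · rw [hA, hB]
          simp [hsetq]
        · rw [hA, hsetq]
          exact pvInv_move q vis c i0 hi0 hq0 ⟨h1, h2, h3⟩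
      case neg =>
        have hcondA : ¬ (pvSkipA q.length q (vis.getD c 0) + 1 < (q.length : Int) ∧
            pvGeA (PySem.List.pyGetD q (pvSkipA q.length q (vis.getD c 0) + 1) none) c = true) := by
          rintro ⟨-, hg2⟩
          rw [hgetA] at hg2
          exact hge (by simpa [pvGeA] using hg2)
        have hA : pvStepA (q, vis) c = (q, vis) := by
          simp only [pvStepA, hcont]
          simp only [Bool.true_eq_false, if_false]
          rw [if_neg hcondA]
        have hB : pvStepB (vis, (q.length : Int)) c = (vis, (q.length : Int)) := by
          simp only [pvStepB, hcont]
          simp only [Bool.true_eq_false, if_false]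
          rw [hsucc]
          simp [hge]
        exact ⟨by rw [hA, hB], by rw [hA]; exact ⟨h1, h2, h3⟩⟩

theorem pvFold_corr (l : List Char) :
    ∀ (q : List (Option Char)) (vis : PySem.Dict Char Int), pvInv q vis →
      l.foldl pvStepB (vis, (q.length : Int)) =
        ((l.foldl pvStepA (q, vis)).2, (((l.foldl pvStepA (q, vis)).1.length : Int))) ∧
      pvInv (l.foldl pvStepA (q, vis)).1 (l.foldl pvStepA (q, vis)).2 := by
  induction l with
  | nil => intro q vis h; exact ⟨rfl, h⟩
  | cons c l ih =>
      intro q vis h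
      obtain ⟨hc, hI⟩ := pvStep_corr q vis c h
      have := ih (pvStepA (q, vis) c).1 (pvStepA (q, vis) c).2 hI
      simpa [hc] using this

-- live chars in slot order are strictly increasing in timestamp
theorem pvPairwise (val : Char → Int) :
    ∀ (q : List (Option Char)) (off : Nat),
      (∀ (i : Nat) (h : i < q.length) (c : Char), q[i] = some c → val c = ((off + i : Nat) : Int)) →
      (q.filterMap id).Pairwise (fun a b => val a < val b) := by
  intro q
  induction q with
  | nil => intro off h; simp
  | cons o q ih =>
      intro off h
      have htail : ∀ (i : Nat) (hi : i < q.length) (c : Char), q[i] = some c →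
          val c = (((off + 1) + i : Nat) : Int) := by
        intro i hi c hc
        have := h (i + 1) (by simp; omega) c (by simpa using hc)
        rw [this]; congr 1; omega
      cases o with
      | none => simpa using ih (off + 1) htail
      | some a =>
          have ha : val a = ((off : Nat) : Int) := by
            have := h 0 (by simp) a (by simp)
            simpa using this
          simp only [List.filterMap_cons, id] at *
          refine List.Pairwise.cons ?_ (ih (off + 1) htail)
          intro b hb
          obtain ⟨ob, hob, hed⟩ := List.mem_filterMap.mp hb
          obtain ⟨j, hj, hjb⟩ := List.mem_iff_getElem.mp hob
          rw [hed] at hjb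
          have := htail j hj b hjb
          rw [ha, this]
          push_cast
          omega

-- final outputs agree
theorem pvOut (q : List (Option Char)) (vis : PySem.Dict Char Int) (h : pvInv q vis) :
    PySem.List.sorted vis.keys (fun d => vis.getD d 0) false = q.filterMap id := by
  obtain ⟨h1, h2, h3⟩ := h
  have hpw : (q.filterMap id).Pairwise (fun a b => vis.getD a 0 < vis.getD b 0) := by
    apply pvPairwise _ q 0
    intro i hi c hc
    have := (h2 i hi c hc).2
    simpa using this
  have hndf : (q.filterMap id).Nodup :=
    List.Pairwise.imp (fun hab => by intro he; subst he; exact absurd hab (lt_irrefl _)) hpw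
  have hmem : ∀ c, c ∈ q.filterMap id ↔ c ∈ vis.keys := by
    intro c
    constructor
    · intro hc
      obtain ⟨o, ho, he⟩ := List.mem_filterMap.mp hc
      obtain ⟨i, hi, hio⟩ := List.mem_iff_getElem.mp ho
      have hio' : q[i] = some c := by rw [hio]; exact he
      exact (PySem.Dict.contains_iff_mem_keys vis c).mp (h2 i hi c hio').1
    · intro hc
      obtain ⟨i, hg, hi, hq⟩ := h1 c ((PySem.Dict.contains_iff_mem_keys vis c).mpr hc)
      exact List.mem_filterMap.mpr ⟨some c, List.mem_iff_getElem.mpr ⟨i, hi, hq⟩, rfl⟩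
  have hperm : (q.filterMap id).Perm vis.keys :=
    (List.perm_ext_iff_of_nodup hndf h3).mpr hmem
  exact PySem.List.sorted_eq_of_perm_of_pairwise_lt _ _ _ hperm hpw

-- ===== VERDICT (by name: the statement is the Claim_ definition above) =====
theorem solve_spec : Claim_equal_solve := by
  intro S _
  unfold Spec_solve solve solve_alt
  obtain ⟨hc, hI⟩ := pvFold_corr S.toList [] PySem.Dict.empty pvInv_init
  simp only [List.length_nil, Int.natCast_zero] at hc
  simp only [hc]
  rw [pvOut _ _ hI]
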